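-- pv_equiv track=rewrite | github.com/idelaniyariets/templates-for-inf_ege | legacy/n_9.py | check_repeats
-- ===== SOURCE A (Python) =====
-- def product(line):
-- #функция для нахождения произведения
-- #чисел в массиве. для решения
--     p = 1
--     for element in line:
--         p *= int(element)
--     return p
--
-- def check_repeats(line):
-- #поиск повторяющихся чисел
--     counts = []
--     for element in line:
--         counts.append(line.count(element))
--     if product(counts) == 3**3: #здесь возводим число повторений в эту же степень
--         return True
--     else:
--         return False
-- ===== SOURCE B (Python) =====
-- def check_repeats(line):
--     freq = {}
--     for element in line:
--         freq[element] = freq.get(element, 0) + 1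
--     repeats = [c for c in freq.values() if c > 1]
--     return repeats == [3]
-- ===== Notes on version B (the rewrite author's own statement) =====
-- stated objective: faster
-- what changed: Replaces A's quadratic pass (a list of line.count(e) for every element, then a product compared to 27) by a single-pass frequency dict and the equivalent test that exactly one distinct value occurs three times and no other value repeats.
import Mathlib
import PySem

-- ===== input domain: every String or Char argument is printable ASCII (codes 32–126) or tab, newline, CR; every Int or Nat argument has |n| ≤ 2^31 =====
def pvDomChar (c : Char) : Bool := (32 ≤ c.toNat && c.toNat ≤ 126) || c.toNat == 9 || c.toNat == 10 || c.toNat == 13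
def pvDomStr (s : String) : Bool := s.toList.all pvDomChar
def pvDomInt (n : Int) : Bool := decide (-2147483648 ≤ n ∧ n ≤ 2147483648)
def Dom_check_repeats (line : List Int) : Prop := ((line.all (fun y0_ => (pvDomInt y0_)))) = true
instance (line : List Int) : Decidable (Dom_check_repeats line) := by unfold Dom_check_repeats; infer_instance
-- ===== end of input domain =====

-- B replaces A's quadratic count-list-and-product test by a one-pass frequency map and the
-- equivalent condition "exactly one distinct value occurs three times and no other value repeats".

-- ===== PORT A =====
def pv_product (line : List Int) : Int :=
  line.foldl (fun p element => p * element) 1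

def check_repeats (line : List Int) : Bool :=
  let counts := line.foldl (fun acc element => acc ++ [((PySem.List.count line element : Nat) : Int)]) []
  if pv_product counts == 3 ^ 3 then true else false

-- ===== PORT B =====
def check_repeats_alt (line : List Int) : Bool :=
  let freq := line.foldl (fun d x => d.insert x (d.getD x 0 + 1)) (PySem.Dict.empty : PySem.Dict Int Int)
  let repeats := freq.values.filter (fun c => decide (1 < c))
  repeats == [3]

-- ===== PRECONDITION & SPEC =====
def Spec_check_repeats (line : List Int) (out : Bool) : Prop := out = check_repeats_alt line
instance (line : List Int) (out : Bool) : Decidable (Spec_check_repeats line out) := by unfold Spec_check_repeats; infer_instance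

-- ===== CLAIM (what is proved, stated in full; the proofs are below) =====
def Claim_equal_check_repeats : Prop := ∀ (line : List Int), Dom_check_repeats line → Spec_check_repeats line (check_repeats line)

-- ===== LEMMAS AND PROOFS =====

-- every factor c^c is positive (0^0 = 1 in Nat)
lemma pv_pow_self_pos (c : Nat) : 0 < c ^ c := by
  cases c with
  | zero => simp
  | succ n => exact Nat.pow_pos (Nat.succ_pos n)

lemma pv_prod_pow_self_pos (cs : List Nat) : 0 < (cs.map (fun c => c ^ c)).prod := by
  induction cs with
  | nil => simp
  | cons c t ih => simpa using Nat.mul_pos (pv_pow_self_pos c) ih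

-- ∏ c^c = 1  ↔  no c exceeds 1
lemma pv_prod_pow_self_eq_one (cs : List Nat) :
    (cs.map (fun c => c ^ c)).prod = 1 ↔ cs.filter (fun c => decide (1 < c)) = [] := by
  induction cs with
  | nil => simp
  | cons c t ih =>
    simp only [List.map_cons, List.prod_cons, List.filter_cons]
    by_cases hc : 1 < c
    · rw [if_pos (by simpa using hc)]
      constructor
      · intro h
        rcases mul_eq_one.mp h with ⟨h1, _⟩
        have : 2 ^ 2 ≤ c ^ c :=
          (Nat.pow_le_pow_left hc c).trans' (Nat.pow_le_pow_right (by omega) hc)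
        omega
      · intro h; exact absurd h (by simp)
    · rw [if_neg (by simpa using hc)]
      have hc1 : c ^ c = 1 := by interval_cases c <;> simp
      rw [hc1, one_mul, ih]

-- the core arithmetic fact: ∏ c^c = 27 ↔ the multiplicities above 1 are exactly [3]
lemma pv_prod_pow_self_eq_27 (cs : List Nat) :
    (cs.map (fun c => c ^ c)).prod = 27 ↔ cs.filter (fun c => decide (1 < c)) = [3] := by
  induction cs with
  | nil => simp
  | cons c t ih =>
    simp only [List.map_cons, List.prod_cons, List.filter_cons]
    by_cases h4 : 4 ≤ c
    · have h256 : 256 ≤ c ^ c := by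
        calc (256 : Nat) = 4 ^ 4 := by norm_num
        _ ≤ c ^ 4 := Nat.pow_le_pow_left h4 4
        _ ≤ c ^ c := Nat.pow_le_pow_right (by omega) h4
      have hpos := pv_prod_pow_self_pos t
      rw [if_pos (by simp; omega)]
      constructor
      · intro h
        have : 256 * 1 ≤ c ^ c * (t.map (fun c => c ^ c)).prod := Nat.mul_le_mul h256 hpos
        omega
      · intro h
        have hc3 : c = 3 := (List.cons_eq_cons.mp h).1
        omega
    · interval_cases c
      · simpa using ih
      · simpa using ih
      · rw [if_pos (by simp)]
        constructor
        · intro h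
          have hpos := pv_prod_pow_self_pos t
          omega
        · intro h
          exact absurd ((List.cons_eq_cons.mp h).1) (by omega)
      · rw [if_pos (by simp)]
        have h27 : (3:Nat) ^ 3 = 27 := by norm_num
        rw [h27]
        constructor
        · intro h
          have hpos := pv_prod_pow_self_pos t
          have h1 : (t.map (fun c => c ^ c)).prod = 1 := by omega
          rw [(pv_prod_pow_self_eq_one t).mp h1]
        · intro h
          rw [(pv_prod_pow_self_eq_one t).mpr (List.cons_eq_cons.mp h).2]

-- counting v in the per-value replicate blocks of a duplicate-free list
lemma pv_sum_counts (l : List Int) (v : Int) :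
    ∀ d : List Int, d.Nodup →
      (d.map (fun u => ((List.replicate (l.count u) u).count v))).sum
        = if v ∈ d then l.count v else 0 := by
  intro d
  induction d with
  | nil => simp
  | cons a t ih =>
    intro hnd
    rcases List.nodup_cons.mp hnd with ⟨ha, ht⟩
    simp only [List.map_cons, List.sum_cons, List.mem_cons]
    rw [ih ht]
    simp only [List.count_replicate]
    by_cases hva : a = v
    · subst hva
      simp [ha]
    · have : (a == v) = false := by simp [hva]
      by_cases hvt : v ∈ t <;> simp [this, Ne.symm hva, hvt]

-- countwise decomposition: line is a permutation of, per distinct value, count-many copies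
lemma pv_perm_flatMap (l d : List Int) (hnd : d.Nodup) (hm : ∀ v, v ∈ d ↔ v ∈ l) :
    l.Perm (d.flatMap fun v => List.replicate (l.count v) v) := by
  rw [List.perm_iff_count]
  intro v
  rw [List.count_flatMap]
  have key := pv_sum_counts l v d hnd
  rw [show (List.map (List.count v ∘ fun u => List.replicate (l.count u) u) d)
      = (d.map (fun u => ((List.replicate (l.count u) u).count v))) from rfl]
  rw [key]
  by_cases hv : v ∈ d
  · simp [hv]
  · have : v ∉ l := fun h => hv ((hm v).mpr h)
    simp [hv, List.count_eq_zero.mpr this]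

-- product of a map over the replicate blocks, as a product of powers
lemma pv_prod_flatMap (f : Int → Nat) (c : Int → Nat) :
    ∀ d : List Int,
      ((d.flatMap fun v => List.replicate (c v) v).map f).prod
        = (d.map (fun v => (f v) ^ (c v))).prod := by
  intro d
  induction d with
  | nil => simp
  | cons a t ih =>
    simp only [List.flatMap_cons, List.map_append, List.prod_append, List.map_cons,
      List.prod_cons, List.map_replicate, List.prod_replicate]
    rw [ih]

-- A's product over all elements equals the product of count^count over distinct values
lemma pv_prod_counts (l d : List Int) (hnd : d.Nodup) (hm : ∀ v, v ∈ d ↔ v ∈ l) :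
    (l.map (fun e => l.count e)).prod
      = ((d.map (fun v => l.count v)).map (fun c => c ^ c)).prod := by
  have hperm := pv_perm_flatMap l d hnd hm
  rw [(hperm.map (fun e => l.count e)).prod_eq,
      pv_prod_flatMap (fun e => l.count e) (fun v => l.count v) d, List.map_map]
  rfl

-- cast helpers
lemma pv_filter_cast (ns : List Nat) :
    (ns.map (fun n : Nat => (n : Int))).filter (fun c => decide (1 < c))
      = (ns.filter (fun c => decide (1 < c))).map (fun n : Nat => (n : Int)) := by
  induction ns with
  | nil => rfl
  | cons a t ih =>
    simp only [List.map_cons, List.filter_cons]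
    by_cases ha : 1 < a
    · simp [ha, ih]
    · simp [ha, ih]

lemma pv_map_cast_eq_three (ns : List Nat) :
    ((ns.map (fun n : Nat => (n : Int))) = [(3 : Int)]) ↔ ns = [3] := by
  cases ns with
  | nil => simp
  | cons a t =>
    cases t with
    | nil => simp; omega
    | cons b u => simp

-- ===== VERDICT (by name: the statement is the Claim_ definition above) =====
theorem check_repeats_spec : Claim_equal_check_repeats := by
  intro line _
  unfold Spec_check_repeats check_repeats check_repeats_alt pv_product
  rw [PySem.List.foldl_append_singleton_eq_map, List.nil_append]
  simp only []
  rw [show (List.foldl (fun p element => p * element) 1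
        (line.map (fun element => ((PySem.List.count line element : Nat) : Int))))
      = (line.map (fun element => ((PySem.List.count line element : Nat) : Int))).prod
    from (List.prod_eq_foldl).symm]
  rw [PySem.Dict.foldl_insert_getD_add_one_eq_counter line]
  have hvals : (PySem.Dict.counter line).values
      = (PySem.Set.ofList line).map (fun k => ((line.count k : Nat) : Int)) := by
    show (PySem.Dict.counter line).items.map (·.2) = _
    rw [PySem.Dict.items_counter]
    simp [List.map_map, Function.comp]
  rw [hvals]
  simp only [PySem.List.count_eq]
  set d : List Int := PySem.Set.ofList line with hd
  have hnd : d.Nodup := PySem.Set.nodup_ofList line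
  have hm : ∀ v, v ∈ d ↔ v ∈ line := fun v => PySem.Set.mem_ofList line v
  have hcastA : (line.map (fun e => ((line.count e : Nat) : Int))).prod
      = (((line.map (fun e => line.count e)).prod : Nat) : Int) := by
    rw [Nat.cast_list_prod, List.map_map]; rfl
  have hcastB : (d.map (fun k => ((line.count k : Nat) : Int)))
      = ((d.map (fun k => line.count k)).map (fun n : Nat => (n : Int))) := by
    rw [List.map_map]; rfl
  simp only [hcastA]
  rw [hcastB, pv_filter_cast]
  have hA : (line.map (fun e => line.count e)).prod = 27
      ↔ ((d.map (fun v => line.count v)).filter (fun c => decide (1 < c))) = [3] := by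
    rw [pv_prod_counts line d hnd hm]
    exact pv_prod_pow_self_eq_27 (d.map (fun v => line.count v))
  by_cases h : (line.map (fun e => line.count e)).prod = 27
  · rw [h]
    rw [show ((((27 : Nat) : Int)) == 3 ^ 3) = true from by decide, if_pos rfl]
    symm
    rw [beq_iff_eq, pv_map_cast_eq_three]
    exact hA.mp h
  · have hne : ((((line.map (fun e => line.count e)).prod : Nat) : Int) == 3 ^ 3) = false := by
      rw [beq_eq_false_iff_ne]
      intro hc
      exact h (by exact_mod_cast hc)
    rw [hne, if_neg (by simp)]
    symm
    rw [beq_eq_false_iff_ne]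
    intro hc
    exact h (hA.mpr ((pv_map_cast_eq_three _).mp hc))
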